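-- pv_equiv track=rewrite | github.com/Juergen-bio/DNA_toolkit | dna/DNAToolkit.py | reading_frames
-- ===== SOURCE A (Python) =====
-- def reading_frames(aa_seq):
--     current_protein = []
--     protein = []
--
--     for aa in aa_seq:
--         if aa == 'M': # starts a string of orf proteins
--             if current_protein:
--                 protein.append(current_protein)
--             current_protein = [aa]
--         elif aa == '_':
--             if current_protein:
--                 protein.append(current_protein)
--                 current_protein = []
--         else:
--             if current_protein:
--                 current_protein.append(aa)
--
--     if current_protein: # adds any remaining proteins
--         protein.append(current_protein)
--     return protein
-- ===== SOURCE B (Python) =====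
-- def reading_frames(aa_seq):
--     # Index/slice scan: find each 'M' start, slice to the next 'M'/'_' boundary.
--     seq = list(aa_seq)
--     n = len(seq)
--     out = []
--     i = 0
--     while i < n:
--         if seq[i] != 'M':
--             i += 1
--             continue
--         j = i + 1
--         while j < n and seq[j] != 'M' and seq[j] != '_':
--             j += 1
--         out.append(seq[i:j])
--         i = j
--     return out
-- ===== Notes on version B (the rewrite author's own statement) =====
-- stated objective: alternative
-- what changed: Replaces A's single-pass current_protein/protein accumulator with flush branches by an index scan that jumps from each 'M' start to the next 'M'/'_' boundary and emits the slice directly.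
import Mathlib
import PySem

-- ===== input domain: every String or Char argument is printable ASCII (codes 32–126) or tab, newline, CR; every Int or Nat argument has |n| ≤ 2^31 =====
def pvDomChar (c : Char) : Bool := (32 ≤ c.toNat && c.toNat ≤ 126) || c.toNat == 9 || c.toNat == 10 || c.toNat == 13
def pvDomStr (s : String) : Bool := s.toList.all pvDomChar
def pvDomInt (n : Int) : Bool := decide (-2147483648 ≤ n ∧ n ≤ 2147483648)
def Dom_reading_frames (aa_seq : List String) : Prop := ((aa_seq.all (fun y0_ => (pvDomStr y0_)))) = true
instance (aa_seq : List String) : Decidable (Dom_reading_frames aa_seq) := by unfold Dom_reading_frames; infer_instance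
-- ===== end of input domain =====

-- B replaces A's accumulator-with-flush-branches loop by an index scan that slices from each 'M'
-- start to the next 'M'/'_' boundary; alternative structure, same cost.

-- ===== PORT A =====
def rfStepA (st : List String × List (List String)) (aa : String) : List String × List (List String) :=
  if aa == "M" then
    ([aa], if st.1.isEmpty then st.2 else st.2 ++ [st.1])
  else if aa == "_" then
    (if st.1.isEmpty then st else ([], st.2 ++ [st.1]))
  else
    (if st.1.isEmpty then st.1 else st.1 ++ [aa], st.2)

def reading_frames (aa_seq : List String) : List (List String) :=
  let st := aa_seq.foldl rfStepA ([], [])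
  if st.1.isEmpty then st.2 else st.2 ++ [st.1]

-- ===== PORT B =====
def rfNotStop (a : String) : Bool := !(a == "M" || a == "_")

def reading_frames_alt : List String → List (List String)
  | [] => []
  | a :: rest =>
    if a == "M" then
      (a :: rest.takeWhile rfNotStop) :: reading_frames_alt (rest.dropWhile rfNotStop)
    else reading_frames_alt rest
termination_by l => l.length
decreasing_by
  · exact Nat.lt_succ_of_le (rest.length_dropWhile_le rfNotStop)
  · simp

-- ===== PRECONDITION & SPEC =====
def Spec_reading_frames (aa_seq : List String) (out : List (List String)) : Prop := out = reading_frames_alt aa_seq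
instance (aa_seq : List String) (out : List (List String)) : Decidable (Spec_reading_frames aa_seq out) := by unfold Spec_reading_frames; infer_instance

-- ===== CLAIM (what is proved, stated in full; the proofs are below) =====
def Claim_equal_reading_frames : Prop := ∀ (aa_seq : List String), Dom_reading_frames aa_seq → Spec_reading_frames aa_seq (reading_frames aa_seq)

-- ===== LEMMAS AND PROOFS =====
lemma rf_key : ∀ (l cur : List String) (prot : List (List String)),
    (let st := l.foldl rfStepA (cur, prot);
     if st.1.isEmpty then st.2 else st.2 ++ [st.1]) =
    if cur.isEmpty then prot ++ reading_frames_alt l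
    else prot ++ (cur ++ l.takeWhile rfNotStop) :: reading_frames_alt (l.dropWhile rfNotStop) := by
  intro l
  induction l with
  | nil =>
    intro cur prot
    cases cur <;> simp [reading_frames_alt]
  | cons a t ih =>
    intro cur prot
    by_cases hM : a = "M"
    · subst hM
      cases cur with
      | nil =>
        simp only [List.foldl_cons, rfStepA, beq_self_eq_true, if_true, List.isEmpty_nil]
        rw [ih]
        simp [reading_frames_alt]
      | cons c cs =>
        simp only [List.foldl_cons, rfStepA, beq_self_eq_true, if_true, List.isEmpty_cons]
        rw [ih]
        simp [reading_frames_alt, rfNotStop]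
    · by_cases hU : a = "_"
      · subst hU
        cases cur with
        | nil =>
          simp only [List.foldl_cons, rfStepA, List.isEmpty_nil]
          rw [show (("_" : String) == "M") = false by decide]
          simp only [Bool.false_eq_true, if_false, beq_self_eq_true, if_true]
          rw [ih]
          simp [reading_frames_alt]
        | cons c cs =>
          simp only [List.foldl_cons, rfStepA, List.isEmpty_cons]
          rw [show (("_" : String) == "M") = false by decide]
          simp only [Bool.false_eq_true, if_false, beq_self_eq_true, if_true]
          rw [ih]
          simp [reading_frames_alt, rfNotStop]
      · have hbM : (a == "M") = false := beq_eq_false_iff_ne.mpr hM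
        have hbU : (a == "_") = false := beq_eq_false_iff_ne.mpr hU
        cases cur with
        | nil =>
          simp only [List.foldl_cons, rfStepA, hbM, hbU, Bool.false_eq_true, if_false,
            List.isEmpty_nil, if_true]
          rw [ih]
          simp [reading_frames_alt, hbM]
        | cons c cs =>
          simp only [List.foldl_cons, rfStepA, hbM, hbU, Bool.false_eq_true, if_false,
            List.isEmpty_cons]
          rw [ih]
          simp [rfNotStop, hbM, hbU]

-- ===== VERDICT (by name: the statement is the Claim_ definition above) =====
theorem reading_frames_spec : Claim_equal_reading_frames := by
  intro aa_seq _
  unfold Spec_reading_frames reading_frames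
  have := rf_key aa_seq [] []
  simpa using this
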